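-- pv_equiv track=rewrite | github.com/pypi-data/pypi-mirror-379 | packages/mockylla/mockylla-0.5.0.tar.gz/mockylla-0.5.0/mockylla/parser/delete.py | _normalise_where_clause
-- ===== SOURCE A (Python) =====
-- def _normalise_where_clause(where_clause_str, parameters):
--     if not parameters:
--         return where_clause_str
--
--     query_parts = where_clause_str.split("%s")
--     if len(query_parts) - 1 != len(parameters):
--         raise ValueError(
--             "Number of parameters does not match number of placeholders in WHERE clause"
--         )
--
--     final_where = query_parts[0]
--     for idx, param in enumerate(parameters):
--         param_str = f"'{param}'" if isinstance(param, str) else str(param)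
--         final_where += param_str + query_parts[idx + 1]
--     return final_where
-- ===== SOURCE B (Python) =====
-- def _normalise_where_clause(where_clause_str, parameters):
--     if not parameters:
--         return where_clause_str
--
--     if where_clause_str.count("%s") != len(parameters):
--         raise ValueError(
--             "Number of parameters does not match number of placeholders in WHERE clause"
--         )
--
--     it = iter(parameters)
--     out = []
--     i = 0
--     n = len(where_clause_str)
--     while i < n:
--         if where_clause_str.startswith("%s", i):
--             p = next(it)
--             out.append(f"'{p}'" if isinstance(p, str) else str(p))
--             i += 2
--         else:
--             out.append(where_clause_str[i])
--             i += 1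
--     return "".join(out)
-- ===== Notes on version B (the rewrite author's own statement) =====
-- stated objective: alternative
-- what changed: B replaces A's split-into-parts-then-interleave-by-index loop with a single left-to-right scan that copies characters and substitutes each %s placeholder in place as it is encountered.
import Mathlib
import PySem

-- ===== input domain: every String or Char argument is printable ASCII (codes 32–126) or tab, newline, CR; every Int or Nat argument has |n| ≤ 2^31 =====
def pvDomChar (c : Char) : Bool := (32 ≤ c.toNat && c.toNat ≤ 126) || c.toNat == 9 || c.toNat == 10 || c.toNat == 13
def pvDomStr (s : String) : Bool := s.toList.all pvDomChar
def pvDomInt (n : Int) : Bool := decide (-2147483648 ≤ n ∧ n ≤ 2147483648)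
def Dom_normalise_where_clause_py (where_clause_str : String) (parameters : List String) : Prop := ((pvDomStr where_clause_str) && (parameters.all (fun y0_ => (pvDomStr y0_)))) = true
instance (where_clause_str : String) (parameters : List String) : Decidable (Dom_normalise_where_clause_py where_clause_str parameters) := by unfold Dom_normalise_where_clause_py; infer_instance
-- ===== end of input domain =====

-- B replaces A's split-into-parts-then-interleave-by-index with a single left-to-right scan that
-- copies characters and substitutes each "%s" in place (objective: alternative, same cost).

-- ===== PORT A =====
-- f"'{param}'" for a str parameter (all parameters are str under the type convention)
def pvQuoteA (p : String) : List Char := '\'' :: (p.toList ++ ['\''])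

-- literal port of A: split on "%s", check len(parts)-1 == len(parameters),
-- then fold over enumerate(parameters) appending param_str + query_parts[idx+1]
def normalise_where_clause_py (where_clause_str : String) (parameters : List String) : String :=
  if parameters = [] then where_clause_str
  else
    let query_parts := PySem.Chars.splitOn where_clause_str.toList ['%', 's']
    if query_parts.length - 1 ≠ parameters.length then ""   -- raise ValueError (excluded by Pre_)
    else
      String.ofList ((PySem.List.enumerate parameters).foldl
        (fun acc ip => acc ++ pvQuoteA ip.2 ++ (PySem.List.pyGet? query_parts (ip.1 + 1)).getD [])
        ((PySem.List.pyGet? query_parts 0).getD []))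

-- ===== PORT B =====
-- the while loop of Source B: scan the characters once, left to right; at each position either the
-- string starts with "%s" there (substitute the next parameter, advance by 2) or copy one char.
-- (the parameters running out mid-scan is unreachable under the count check / Pre_)
def pvScanB : List Char → List String → List Char
  | [], _ => []
  | c :: rest, ps =>
    if c = '%' ∧ rest.take 1 = ['s'] then
      match ps with
      | p :: ps' => pvQuoteA p ++ pvScanB rest.tail ps'
      | [] => c :: pvScanB rest ps
    else c :: pvScanB rest ps
termination_by l => l.length
decreasing_by all_goals simp [List.length_tail]

def normalise_where_clause_py_alt (where_clause_str : String) (parameters : List String) : String :=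
  if parameters = [] then where_clause_str
  else if PySem.Str.count where_clause_str "%s" ≠ parameters.length then ""  -- raise ValueError (excluded by Pre_)
  else String.ofList (pvScanB where_clause_str.toList parameters)

-- ===== PRECONDITION & SPEC =====
-- Pre_ excludes exactly the inputs on which A raises ValueError: a non-empty parameter list whose
-- length differs from the number of "%s" placeholders (B raises the same ValueError there).
def Pre_normalise_where_clause_py (where_clause_str : String) (parameters : List String) : Prop :=
  parameters = [] ∨ PySem.Str.count where_clause_str "%s" = parameters.length
instance (where_clause_str : String) (parameters : List String) : Decidable (Pre_normalise_where_clause_py where_clause_str parameters) := by unfold Pre_normalise_where_clause_py; infer_instance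

def pvWitness_normalise_where_clause_py : String × List String := ("name = %s AND age = %s", ["bob", "7"])

def Spec_normalise_where_clause_py (where_clause_str : String) (parameters : List String) (out : String) : Prop := out = normalise_where_clause_py_alt where_clause_str parameters
instance (where_clause_str : String) (parameters : List String) (out : String) : Decidable (Spec_normalise_where_clause_py where_clause_str parameters out) := by unfold Spec_normalise_where_clause_py; infer_instance

-- ===== CLAIM (what is proved, stated in full; the proofs are below) =====
def Claim_equal_normalise_where_clause_py : Prop := ∀ (where_clause_str : String) (parameters : List String), Dom_normalise_where_clause_py where_clause_str parameters → Pre_normalise_where_clause_py where_clause_str parameters → Spec_normalise_where_clause_py where_clause_str parameters (normalise_where_clause_py where_clause_str parameters)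

-- ===== LEMMAS AND PROOFS =====

-- structural characterisation of the split on ['%','s']
def pvSplit : List Char → List (List Char)
  | [] => [[]]
  | c :: rest =>
    if c = '%' ∧ rest.take 1 = ['s'] then [] :: pvSplit rest.tail
    else (c :: (pvSplit rest).headI) :: (pvSplit rest).tail
termination_by l => l.length
decreasing_by all_goals simp [List.length_tail]

-- structural characterisation of the count of ['%','s']
def pvCount : List Char → Nat
  | [] => 0
  | c :: rest =>
    if c = '%' ∧ rest.take 1 = ['s'] then pvCount rest.tail + 1
    else pvCount rest
termination_by l => l.length
decreasing_by all_goals simp [List.length_tail]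

lemma pat_dest {c : Char} {rest : List Char} (h : c = '%' ∧ rest.take 1 = ['s']) :
    c = '%' ∧ rest = 's' :: rest.tail := by
  obtain ⟨h1, h2⟩ := h
  cases rest with
  | nil => simp at h2
  | cons r t => simp [List.take] at h2; exact ⟨h1, by simp [h2]⟩

lemma pat_iff (c : Char) (rest : List Char) :
    ['%', 's'].isPrefixOf (c :: rest) = true ↔ (c = '%' ∧ rest.take 1 = ['s']) := by
  cases rest with
  | nil => simp [List.isPrefixOf]
  | cons r t =>
      simp [List.isPrefixOf, List.take]
      exact and_congr eq_comm eq_comm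

lemma pvSplit_cons (c : Char) (rest : List Char) :
    pvSplit (c :: rest) = if c = '%' ∧ rest.take 1 = ['s'] then [] :: pvSplit rest.tail
      else (c :: (pvSplit rest).headI) :: (pvSplit rest).tail := by
  rw [pvSplit.eq_def]

lemma pvCount_cons (c : Char) (rest : List Char) :
    pvCount (c :: rest) = if c = '%' ∧ rest.take 1 = ['s'] then pvCount rest.tail + 1
      else pvCount rest := by
  rw [pvCount.eq_def]

lemma pvScanB_cons (c : Char) (rest : List Char) (ps : List String) :
    pvScanB (c :: rest) ps = if c = '%' ∧ rest.take 1 = ['s'] then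
        (match ps with
         | p :: ps' => pvQuoteA p ++ pvScanB rest.tail ps'
         | [] => c :: pvScanB rest ps)
      else c :: pvScanB rest ps := by
  rw [pvScanB.eq_def]

lemma pvSplit_ne_nil (l : List Char) : pvSplit l ≠ [] := by
  induction l using pvSplit.induct <;> simp [pvSplit, *]

lemma length_pvSplit (l : List Char) : (pvSplit l).length = pvCount l + 1 := by
  induction l using pvSplit.induct with
  | case1 => simp [pvSplit, pvCount]
  | case2 c rest h ih => simp [pvSplit, pvCount, h, ih]
  | case3 c rest h ih =>
      have hne := pvSplit_ne_nil rest
      cases hrest : pvSplit rest with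
      | nil => exact absurd hrest hne
      | cons a t =>
          rw [hrest] at ih
          simp [pvSplit, pvCount, h, hrest]
          simp at ih
          omega

lemma count_go_eq (fuel : Nat) : ∀ (l : List Char) (acc : Nat), l.length ≤ fuel →
    PySem.Chars.count.go ['%', 's'] fuel l acc = acc + pvCount l := by
  induction fuel with
  | zero =>
      intro l acc h
      have : l = [] := by cases l <;> simp_all
      subst this; simp [PySem.Chars.count.go, pvCount]
  | succ f ih =>
      intro l acc h
      match l with
      | [] => simp [PySem.Chars.count.go, pvCount]
      | c :: rest =>
          rw [PySem.Chars.count.go]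
          by_cases hp : c = '%' ∧ rest.take 1 = ['s']
          · obtain ⟨h1, h2⟩ := pat_dest hp
            have hpre : ['%', 's'].isPrefixOf (c :: rest) = true := (pat_iff c rest).mpr hp
            simp only [hpre, if_true]
            have hdrop : List.drop (['%', 's'] : List Char).length (c :: rest) = rest.tail := by
              rw [show rest = 's' :: rest.tail from h2]; rfl
            rw [hdrop]
            rw [ih rest.tail (acc + 1) (by rw [show rest = 's' :: rest.tail from h2] at h; simp at h ⊢; omega)]
            rw [pvCount_cons, if_pos hp]
            omega
          · have hpre : ['%', 's'].isPrefixOf (c :: rest) = false := by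
              rw [Bool.eq_false_iff, ne_eq, pat_iff]; exact hp
            simp only [hpre, Bool.false_eq_true, if_false]
            rw [ih rest acc (by simp at h; omega)]
            rw [pvCount_cons, if_neg hp]

lemma count_eq_pvCount (l : List Char) : PySem.Chars.count l ['%', 's'] = pvCount l := by
  rw [PySem.Chars.count]
  simp only [List.isEmpty_cons, Bool.false_eq_true, if_false]
  rw [count_go_eq l.length l 0 (le_refl _)]
  omega

lemma split_go_eq (fuel : Nat) : ∀ (l cur : List Char) (acc : List (List Char)), l.length < fuel →
    PySem.Chars.splitOn.go ['%', 's'] fuel l cur acc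
      = acc.reverse ++ (cur.reverse ++ (pvSplit l).headI) :: (pvSplit l).tail := by
  induction fuel with
  | zero => intro l cur acc h; omega
  | succ f ih =>
      intro l cur acc h
      match l with
      | [] => simp [PySem.Chars.splitOn.go, pvSplit]
      | c :: rest =>
          rw [PySem.Chars.splitOn.go]
          by_cases hp : c = '%' ∧ rest.take 1 = ['s']
          · obtain ⟨h1, h2⟩ := pat_dest hp
            have hpre : ['%', 's'].isPrefixOf (c :: rest) = true := (pat_iff c rest).mpr hp
            simp only [hpre, if_true]
            have hdrop : List.drop (['%', 's'] : List Char).length (c :: rest) = rest.tail := by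
              rw [show rest = 's' :: rest.tail from h2]; rfl
            rw [hdrop]
            rw [ih rest.tail [] (cur.reverse :: acc) (by rw [show rest = 's' :: rest.tail from h2] at h; simp at h ⊢; omega)]
            have hne := pvSplit_ne_nil rest.tail
            cases hrest : pvSplit rest.tail with
            | nil => exact absurd hrest hne
            | cons a t =>
                rw [pvSplit_cons, if_pos hp, hrest]
                simp
          · have hpre : ['%', 's'].isPrefixOf (c :: rest) = false := by
              rw [Bool.eq_false_iff, ne_eq, pat_iff]; exact hp
            simp only [hpre, Bool.false_eq_true, if_false]
            rw [ih rest (c :: cur) acc (by simp at h ⊢; omega)]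
            rw [pvSplit_cons, if_neg hp]
            simp

lemma splitOn_eq_pvSplit (l : List Char) : PySem.Chars.splitOn l ['%', 's'] = pvSplit l := by
  rw [PySem.Chars.splitOn]
  rw [split_go_eq (l.length + 1) l [] [] (by omega)]
  have hne := pvSplit_ne_nil l
  cases h : pvSplit l with
  | nil => exact absurd h hne
  | cons a t => simp

-- A's interleaving loop, in structural form over the remaining tail parts
def pvGlue : List Char → List (List Char) → List String → List Char
  | acc, _, [] => acc
  | acc, parts, p :: ps => pvGlue (acc ++ pvQuoteA p ++ parts.headI) parts.tail ps

lemma pvGlue_append (ps : List String) : ∀ (a b : List Char) (parts : List (List Char)),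
    pvGlue (a ++ b) parts ps = a ++ pvGlue b parts ps := by
  induction ps with
  | nil => intro a b parts; simp [pvGlue]
  | cons p ps ih =>
      intro a b parts
      simp only [pvGlue]
      rw [← ih a (b ++ pvQuoteA p ++ parts.headI) parts.tail]
      simp [List.append_assoc]

lemma foldl_enum_eq_glue (ps : List String) : ∀ (parts : List (List Char)) (k : Nat) (acc : List Char),
    ps.length + (k + 1) ≤ parts.length →
    (PySem.List.enumerate ps (k : Int)).foldl
        (fun acc ip => acc ++ pvQuoteA ip.2 ++ (PySem.List.pyGet? parts (ip.1 + 1)).getD []) acc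
      = pvGlue acc (parts.drop (k + 1)) ps := by
  induction ps with
  | nil => intro parts k acc h; simp [PySem.List.enumerate_nil, pvGlue]
  | cons p ps ih =>
      intro parts k acc h
      rw [PySem.List.enumerate_cons]
      simp only [List.foldl_cons]
      have hk1 : k + 1 < parts.length := by simp at h; omega
      have hget : (PySem.List.pyGet? parts ((k : Int) + 1)).getD [] = parts[k + 1] := by
        have hc : ((k : Int) + 1) = ((k + 1 : Nat) : Int) := by push_cast; ring
        rw [hc, PySem.List.pyGet?_natCast]
        simp [List.getElem?_eq_getElem hk1]
      have hcast : (k : Int) + 1 = ((k + 1 : Nat) : Int) := by push_cast; ring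
      rw [hget, hcast, ih parts (k + 1) _ (by simp at h ⊢; omega)]
      have hhead : (parts.drop (k + 1)).headI = parts[k + 1] := by
        have h0 : (parts.drop (k + 1))[0]? = some parts[k + 1] := by
          rw [List.getElem?_drop]
          simp [List.getElem?_eq_getElem hk1]
        cases hd : parts.drop (k + 1) with
        | nil => rw [hd] at h0; simp at h0
        | cons a t => rw [hd] at h0; simp at h0; simp [h0]
      have htail : parts.drop (k + 1 + 1) = (parts.drop (k + 1)).tail := by
        rw [← List.drop_drop]; simp
      rw [show pvGlue acc (parts.drop (k + 1)) (p :: ps)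
            = pvGlue (acc ++ pvQuoteA p ++ (parts.drop (k + 1)).headI) (parts.drop (k + 1)).tail ps from rfl]
      rw [hhead, ← htail]

-- the heart of the proof: glueing A's parts equals B's single scan
lemma glue_eq_scan (l : List Char) : ∀ (ps : List String), pvCount l = ps.length →
    pvGlue (pvSplit l).headI (pvSplit l).tail ps = pvScanB l ps := by
  induction l using pvSplit.induct with
  | case1 =>
      intro ps hc
      match ps with
      | [] => simp [pvSplit, pvGlue, pvScanB]
      | p :: ps => simp [pvCount] at hc
  | case2 c rest h ih =>
      intro ps hc
      rw [pvCount_cons, if_pos h] at hc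
      match ps with
      | [] => simp at hc
      | p :: ps =>
          have hc' : pvCount rest.tail = ps.length := by simp at hc; omega
          rw [pvSplit_cons, if_pos h, pvScanB_cons, if_pos h]
          simp only [List.headI_cons, List.tail_cons]
          rw [show pvGlue [] (pvSplit rest.tail) (p :: ps)
                = pvGlue ([] ++ pvQuoteA p ++ (pvSplit rest.tail).headI) (pvSplit rest.tail).tail ps from rfl]
          simp only [List.nil_append]
          rw [pvGlue_append ps (pvQuoteA p) (pvSplit rest.tail).headI (pvSplit rest.tail).tail]
          rw [ih ps hc']
  | case3 c rest h ih =>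
      intro ps hc
      rw [pvCount_cons, if_neg h] at hc
      rw [pvSplit_cons, if_neg h, pvScanB_cons, if_neg h]
      simp only [List.headI_cons, List.tail_cons]
      match ps with
      | [] =>
          rw [show pvGlue (c :: (pvSplit rest).headI) (pvSplit rest).tail [] = c :: (pvSplit rest).headI from rfl]
          have := ih [] hc
          simp only [pvGlue] at this
          rw [this]
      | p :: ps =>
          rw [show pvGlue (c :: (pvSplit rest).headI) (pvSplit rest).tail (p :: ps)
                = pvGlue ((c :: (pvSplit rest).headI) ++ pvQuoteA p ++ (pvSplit rest).tail.headI)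
                    (pvSplit rest).tail.tail ps from rfl]
          rw [show ((c :: (pvSplit rest).headI) ++ pvQuoteA p ++ (pvSplit rest).tail.headI)
                = [c] ++ ((pvSplit rest).headI ++ pvQuoteA p ++ (pvSplit rest).tail.headI) from by
            simp [List.append_assoc]]
          rw [pvGlue_append ps [c] _ _]
          have := ih (p :: ps) hc
          simp only [pvGlue] at this
          rw [this]
          rfl

-- ===== VERDICT (by name: the statement is the Claim_ definition above) =====
theorem normalise_where_clause_py_spec : Claim_equal_normalise_where_clause_py := by
  intro s ps _ hpre
  unfold Spec_normalise_where_clause_py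
  unfold normalise_where_clause_py normalise_where_clause_py_alt
  rcases hpre with hps | hcount
  · simp [hps]
  · by_cases hps : ps = []
    · simp [hps]
    · simp only [hps, if_false]
      have hl : "%s".toList = ['%', 's'] := by decide
      have hcnt : pvCount s.toList = ps.length := by
        have h1 : PySem.Str.count s "%s" = PySem.Chars.count s.toList ['%', 's'] := by
          rw [PySem.Str.count, hl]
        rw [← count_eq_pvCount, ← h1]
        exact hcount
      have hsplit := splitOn_eq_pvSplit s.toList
      simp only [hsplit, length_pvSplit, hcnt]
      rw [if_neg (by omega : ¬ (ps.length + 1 - 1 ≠ ps.length))]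
      rw [if_neg (show ¬ (PySem.Str.count s "%s" ≠ ps.length) from fun hne => hne hcount)]
      congr 1
      have hget0 : (PySem.List.pyGet? (pvSplit s.toList) 0).getD [] = (pvSplit s.toList).headI := by
        have hne := pvSplit_ne_nil s.toList
        cases h : pvSplit s.toList with
        | nil => exact absurd h hne
        | cons a t =>
            rw [show (0 : Int) = ((0 : Nat) : Int) from rfl, PySem.List.pyGet?_natCast]
            simp
      rw [hget0]
      have hfold := foldl_enum_eq_glue ps (pvSplit s.toList) 0 (pvSplit s.toList).headI
        (by rw [length_pvSplit, hcnt])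
      simp only [Nat.cast_zero] at hfold
      rw [hfold, List.drop_one]
      exact glue_eq_scan s.toList ps hcnt
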